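-- pv_equiv track=rewrite | github.com/SOOJEONGKIMM/BOJ_algorithm | DivideConquer/17829_222-풀링.py | search
-- ===== SOURCE A (Python) =====
-- def search(arr, n):
--     if n==1:
--         return arr[0][0]
--
--     new_arr = [[] for _ in range(n//2)]
--
--     for i in range(0, n, 2):
--         for j in range(0, n, 2):
--             new_arr[i//2].append(sorted([arr[i][j], arr[i][j+1], arr[i+1][j], arr[i+1][j+1]])[2])
--
--     return search(new_arr, n//2)
-- ===== SOURCE B (Python) =====
-- def search(arr, n):
--     cur, m = arr, n
--     while m > 1:
--         cur = [[sorted([cur[i][j], cur[i][j + 1], cur[i + 1][j], cur[i + 1][j + 1]])[2]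
--                 for j in range(0, m, 2)]
--                for i in range(0, m, 2)]
--         m //= 2
--     return cur[0][0]
-- ===== Notes on version B (the rewrite author's own statement) =====
-- stated objective: alternative
-- what changed: Replaced the recursion (which preallocates n//2 empty rows and appends into them via nested index loops) by an iterative while-loop that rebuilds each pooled level as a nested comprehension until the grid is 1x1.
import Mathlib
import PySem

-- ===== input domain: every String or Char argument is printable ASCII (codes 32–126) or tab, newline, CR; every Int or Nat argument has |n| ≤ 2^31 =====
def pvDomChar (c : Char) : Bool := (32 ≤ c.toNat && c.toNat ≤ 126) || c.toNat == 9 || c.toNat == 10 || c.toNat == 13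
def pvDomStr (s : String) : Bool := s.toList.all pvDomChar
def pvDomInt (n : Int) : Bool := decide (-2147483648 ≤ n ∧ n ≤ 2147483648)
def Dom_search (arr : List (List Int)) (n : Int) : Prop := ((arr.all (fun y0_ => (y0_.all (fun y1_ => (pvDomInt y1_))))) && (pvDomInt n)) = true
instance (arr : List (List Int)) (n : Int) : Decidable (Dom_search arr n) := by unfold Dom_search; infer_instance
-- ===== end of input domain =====

-- B replaces A's recursion by an iterative level-by-level reduction (a while-loop building each
-- pooled grid by comprehension instead of recursive calls appending into a preallocated list);
-- objective: alternative decomposition, same cost.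

-- shared helpers: arr[i][j] (IndexError → default, reached only outside Pre_search)
-- and sorted([a,b,c,d])[2], both exactly as both Pythons write them
def at2 (g : List (List Int)) (i j : Int) : Int :=
  PySem.List.pyGetD (PySem.List.pyGetD g i []) j 0

def cell (g : List (List Int)) (i j : Int) : Int :=
  PySem.List.pyGetD
    (PySem.List.sorted [at2 g i j, at2 g i (j + 1), at2 g (i + 1) j, at2 g (i + 1) (j + 1)]
      (fun x => x) false) 2 0

-- ===== PORT A =====
def search (arr : List (List Int)) (n : Int) : Int :=
  if _h1 : n = 1 then at2 arr 0 0
  else if _h2 : n ≤ 1 then 0  -- Python recurses forever here (n ≤ 0); unreachable inside Pre_search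
  else
    let new_arr : List (List Int) :=
      (PySem.List.pyRange 0 n 2).foldl
        (fun acc i =>
          (PySem.List.pyRange 0 n 2).foldl
            (fun acc2 j =>
              acc2.modify (PySem.Int.floordiv i 2).toNat (fun row => row ++ [cell arr i j]))
            acc)
        (List.replicate (PySem.Int.floordiv n 2).toNat [])
    search new_arr (PySem.Int.floordiv n 2)
termination_by n.toNat
decreasing_by
  rw [PySem.Int.floordiv_eq_ediv_of_pos (by omega)]
  omega

-- ===== PORT B =====
def poolOnce (cur : List (List Int)) (m : Int) : List (List Int) :=
  (PySem.List.pyRange 0 m 2).map (fun i =>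
    (PySem.List.pyRange 0 m 2).map (fun j => cell cur i j))

def search_alt (arr : List (List Int)) (n : Int) : Int :=
  if _h : 1 < n then search_alt (poolOnce arr n) (PySem.Int.floordiv n 2)
  else at2 arr 0 0
termination_by n.toNat
decreasing_by
  rw [PySem.Int.floordiv_eq_ediv_of_pos (by omega)]
  omega

-- ===== PRECONDITION & SPEC =====
-- Pre_search: exactly where the Python A returns — n a power of two (2^31 caps it inside Dom),
-- arr has at least n rows and each of the first n rows has at least n entries (else IndexError;
-- non-powers of two reach an odd n > 1 or n ≤ 0 and raise IndexError / RecursionError).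
def Pre_search (arr : List (List Int)) (n : Int) : Prop :=
  (∃ k : ℕ, k < 32 ∧ n = 2 ^ k) ∧ n ≤ (arr.length : Int) ∧
    ∀ row ∈ arr.take n.toNat, n ≤ (row.length : Int)
instance (arr : List (List Int)) (n : Int) : Decidable (Pre_search arr n) := by
  unfold Pre_search; infer_instance

def pvWitness_search : List (List Int) × Int := ([[1, 2], [3, 4]], 2)

def Spec_search (arr : List (List Int)) (n : Int) (out : Int) : Prop := out = search_alt arr n
instance (arr : List (List Int)) (n : Int) (out : Int) : Decidable (Spec_search arr n out) := by
  unfold Spec_search; infer_instance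

-- ===== CLAIM (what is proved, stated in full; the proofs are below) =====
def Claim_equal_search : Prop := ∀ (arr : List (List Int)) (n : Int), Dom_search arr n → Pre_search arr n → Spec_search arr n (search arr n)

-- ===== LEMMAS AND PROOFS =====

-- modify at the seam of an append
lemma modify_append_cons {α : Type} (acc l : List α) (b : α) (f : α → α) :
    (acc ++ b :: l).modify acc.length f = acc ++ f b :: l := by
  induction acc with
  | nil => simp
  | cons a t ih => simpa using ih

-- the inner j-loop of A appends one whole row into slot t
lemma foldl_modify_append (t : ℕ) (f : Int → Int) (js : List Int) :
    ∀ acc : List (List Int),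
      js.foldl (fun a j => a.modify t (fun r => r ++ [f j])) acc
        = acc.modify t (fun r => r ++ js.map f) := by
  induction js with
  | nil =>
      intro acc
      rw [List.foldl_nil, show (fun r : List Int => r ++ List.map f []) = id by funext r; simp,
        List.modify_id]
  | cons j js ih =>
      intro acc
      rw [List.foldl_cons, ih, List.modify_modify_eq]
      congr 1
      funext r
      simp

-- range(0, 2*K, 2) is the doubled List.range' 0 K
lemma pyRange_even (K : ℕ) :
    PySem.List.pyRange 0 (2 * (K : Int)) 2 = (List.range' 0 K).map (fun (t : ℕ) => 2 * (t : Int)) := by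
  rw [PySem.List.pyRange_of_pos 0 (2 * (K : Int)) (by norm_num)]
  have h : (if (0 : ℤ) < 2 * (K : Int) then ((2 * (K : Int) - 0 + 2 - 1) / 2).toNat else 0) = K := by
    split_ifs with h <;> omega
  rw [h, ← List.range_eq_range']
  simp only [zero_add]

-- the outer i-loop fills slots s, s+1, … in order, starting from blank rows
lemma foldl_build (g : Int → List Int) :
    ∀ (K s : ℕ) (acc : List (List Int)), acc.length = s →
      List.foldl (fun a (i : Int) => a.modify (PySem.Int.floordiv i 2).toNat (fun r => r ++ g i))
          (acc ++ List.replicate K ([] : List Int))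
          ((List.range' s K).map (fun (t : ℕ) => 2 * (t : Int)))
        = acc ++ (List.range' s K).map (fun (t : ℕ) => g (2 * (t : Int))) := by
  intro K
  induction K with
  | zero => intro s acc _; simp
  | succ K ih =>
      intro s acc hlen
      rw [List.range'_succ]
      simp only [List.map_cons, List.foldl_cons, List.replicate_succ]
      have hfd : (PySem.Int.floordiv (2 * (s : Int)) 2).toNat = s := by
        rw [PySem.Int.floordiv_eq_ediv_of_pos (by omega)]; omega
      have h1 : (acc ++ ([] : List Int) :: List.replicate K ([] : List Int)).modify s
            (fun r => r ++ g (2 * (s : Int)))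
          = (acc ++ [g (2 * (s : Int))]) ++ List.replicate K ([] : List Int) := by
        rw [← hlen, modify_append_cons]
        simp
      rw [hfd, h1, ih (s + 1) (acc ++ [g (2 * (s : Int))]) (by simp [hlen])]
      simp

-- A's append-built level equals B's comprehension-built level (even size)
lemma build_eq_pool (arr : List (List Int)) (K : ℕ) :
    (PySem.List.pyRange 0 (2 * (K : Int)) 2).foldl
        (fun acc i =>
          (PySem.List.pyRange 0 (2 * (K : Int)) 2).foldl
            (fun acc2 j =>
              acc2.modify (PySem.Int.floordiv i 2).toNat (fun row => row ++ [cell arr i j]))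
            acc)
        (List.replicate (PySem.Int.floordiv (2 * (K : Int)) 2).toNat [])
      = poolOnce arr (2 * (K : Int)) := by
  have hfd : (PySem.Int.floordiv (2 * (K : Int)) 2).toNat = K := by
    rw [PySem.Int.floordiv_eq_ediv_of_pos (by omega)]; omega
  rw [hfd, pyRange_even]
  simp only [foldl_modify_append]
  have := foldl_build (fun i => ((List.range' 0 K).map (fun (t : ℕ) => 2 * (t : Int))).map
    (fun j => cell arr i j)) K 0 [] rfl
  simp only [List.nil_append] at this
  rw [this]
  simp [poolOnce, pyRange_even, List.map_map]

-- the two programs agree on every power-of-two size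
lemma search_eq_alt_pow (k : ℕ) :
    ∀ arr : List (List Int), search arr ((2 : Int) ^ k) = search_alt arr ((2 : Int) ^ k) := by
  induction k with
  | zero =>
      intro arr
      rw [search, search_alt]
      norm_num
  | succ k ih =>
      intro arr
      have hK1 : (1 : Int) ≤ 2 ^ k := one_le_pow₀ (by norm_num)
      have hn : (2 : Int) ^ (k + 1) = 2 * ((2 ^ k : ℕ) : Int) := by push_cast; ring
      have hfd : PySem.Int.floordiv ((2 : Int) ^ (k + 1)) 2 = (2 : Int) ^ k := by
        rw [PySem.Int.floordiv_eq_ediv_of_pos (by omega), pow_succ, mul_comm]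
        exact Int.mul_ediv_cancel_left _ (by norm_num)
      rw [search, search_alt]
      rw [dif_neg (by omega), dif_neg (by omega), dif_pos (by omega)]
      have hbuild := build_eq_pool arr ((2 : ℕ) ^ k)
      rw [← hn] at hbuild
      rw [hfd] at hbuild ⊢
      rw [hbuild]
      exact ih (poolOnce arr ((2 : Int) ^ (k + 1)))

-- ===== VERDICT (by name: the statement is the Claim_ definition above) =====
theorem search_spec : Claim_equal_search := by
  intro arr n _hdom hpre
  obtain ⟨⟨k, _hk, hn⟩, _, _⟩ := hpre
  subst hn
  unfold Spec_search
  exact search_eq_alt_pow k arr
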